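-- pv_equiv track=rewrite | github.com/MichalKuzma/CodingWithMateusz | spoj/FCTRL3.py | factorial_last_digits
-- ===== SOURCE A (Python) =====
-- def factorial_last_digits(n):
--     if n in [0,1]:
--         return 1
--
--     # if n >= 1000 then n! = 1 * 2 * ... * 1000 * 1001 * ... *  n
--     if n >= 1000:
--         return 0
--
--     result = 1
--     for i in range(2, n + 1):
--         result = (result * i) % 100
--     return result
-- ===== SOURCE B (Python) =====
-- _TABLE = (2, 6, 24, 20, 20, 40, 20, 80)  # n! % 100 for n = 2..9
--
-- def factorial_last_digits(n):
--     if n < 2: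
--         return 1
--     if n > 9:
--         return 0
--     return _TABLE[n - 2]
-- ===== Notes on version B (the rewrite author's own statement) =====
-- stated objective: simpler
-- what changed: Replaces the accumulation loop with a closed-form 8-entry table lookup: n! mod 100 is 0 for every n >= 10 and 1 for n < 2, so only n = 2..9 need stored values.
import Mathlib
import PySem

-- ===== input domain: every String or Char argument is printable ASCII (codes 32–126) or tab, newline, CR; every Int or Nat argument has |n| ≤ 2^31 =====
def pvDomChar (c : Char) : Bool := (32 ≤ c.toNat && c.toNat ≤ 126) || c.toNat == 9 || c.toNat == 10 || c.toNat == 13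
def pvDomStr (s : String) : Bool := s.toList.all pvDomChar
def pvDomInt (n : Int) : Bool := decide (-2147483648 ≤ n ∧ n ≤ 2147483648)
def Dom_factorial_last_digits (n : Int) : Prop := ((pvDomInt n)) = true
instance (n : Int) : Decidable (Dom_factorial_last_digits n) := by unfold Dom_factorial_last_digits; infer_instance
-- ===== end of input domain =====

-- B replaces A's loop by a closed-form 8-entry table (n! mod 100 is 0 for n ≥ 10, 1 for n < 2): simpler and O(1).

-- ===== PORT A =====
def factorial_last_digits (n : Int) : Int :=
  if n = 0 ∨ n = 1 then 1
  else if n ≥ 1000 then 0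
  else (PySem.List.pyRange 2 (n + 1) 1).foldl (fun result i => PySem.Int.mod (result * i) 100) 1

-- ===== PORT B =====
def factorial_last_digits_alt (n : Int) : Int :=
  if n < 2 then 1
  else if n > 9 then 0
  else PySem.List.pyGetD [(2 : Int), 6, 24, 20, 20, 40, 20, 80] (n - 2) 0

-- ===== PRECONDITION & SPEC =====
def Spec_factorial_last_digits (n : Int) (out : Int) : Prop := out = factorial_last_digits_alt n
instance (n : Int) (out : Int) : Decidable (Spec_factorial_last_digits n out) := by unfold Spec_factorial_last_digits; infer_instance

-- ===== CLAIM (what is proved, stated in full; the proofs are below) =====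
def Claim_equal_factorial_last_digits : Prop := ∀ (n : Int), Dom_factorial_last_digits n → Spec_factorial_last_digits n (factorial_last_digits n)

-- ===== LEMMAS AND PROOFS =====

-- once the accumulator is 0, the loop keeps it 0
theorem pvFoldZero (l : List Int) : l.foldl (fun result i => PySem.Int.mod (result * i) 100) 0 = 0 := by
  induction l with
  | nil => rfl
  | cons x xs ih => simpa [PySem.Int.mod] using ih

theorem pvLoopZero (n : Int) (h : 10 ≤ n) :
    (PySem.List.pyRange 2 (n + 1) 1).foldl (fun result i => PySem.Int.mod (result * i) 100) 1 = 0 := by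
  rw [PySem.List.pyRange_one_append 2 11 (n + 1) (by omega) (by omega), List.foldl_append]
  have h11 : (PySem.List.pyRange 2 11 1).foldl (fun result i => PySem.Int.mod (result * i) 100) 1 = 0 := by
    decide
  rw [h11, pvFoldZero]

-- ===== VERDICT (by name: the statement is the Claim_ definition above) =====
theorem factorial_last_digits_spec : Claim_equal_factorial_last_digits := by
  intro n _
  unfold Spec_factorial_last_digits factorial_last_digits factorial_last_digits_alt
  by_cases h01 : n = 0 ∨ n = 1
  · rcases h01 with rfl | rfl <;> decide
  · simp only [if_neg h01]
    by_cases hbig : n ≥ 1000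
    · rw [if_pos hbig, if_neg (by omega), if_pos (by omega)]
    · rw [if_neg hbig]
      by_cases hlt : n < 2
      · rw [if_pos hlt, PySem.List.pyRange_one_eq_nil (by omega)]
        rfl
      · rw [if_neg hlt]
        by_cases hgt : n > 9
        · rw [if_pos hgt, pvLoopZero n (by omega)]
        · interval_cases n <;> decide
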